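-- pv_equiv track=rewrite | github.com/soorajachar/Multiplexed-Flow-Data-Processing | programs/dataProcessing/miscFunctions.py | parseCommandLineNNString
-- ===== SOURCE A (Python) =====
-- def parseCommandLineNNString(inputString):
--     if(',' in inputString):
--         if('-' in inputString): # - and ,
--             experimentNumbers = []
--             experimentRanges = list(inputString.split(','))
--             for experimentRangeString in experimentRanges:
--                 if('-' in experimentRangeString):
--                     experimentNumberRange = list(map(int, experimentRangeString.split('-')))
--                     tempExperimentNumbers = list(range(experimentNumberRange[0],experimentNumberRange[1]+1))
--                     for eNum in tempExperimentNumbers: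
--                         experimentNumbers.append(eNum)
--                 else:
--                     experimentNumbers.append(int(experimentRangeString))
--         else: #just ,
--             experimentNumbers = list(map(int, inputString.split(',')))
--     else:
--         if('-' in inputString): #just -
--             experimentNumberRange = list(map(int, inputString.split('-')))
--             experimentNumbers = list(range(experimentNumberRange[0],experimentNumberRange[1]+1))
--         else: #just single experiment number
--             experimentNumbers = int(inputString)
--     if isinstance(experimentNumbers, int):
--         return [experimentNumbers]
--     else:
--         return experimentNumbers
-- ===== SOURCE B (Python) =====
-- def parseCommandLineNNString(inputString):
--     # Stage 1: normalize every comma token into an interval pair (lo, hi);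
--     # a bare number n becomes (n, n), a dash token "a-b" becomes (a, b).
--     def bounds(token):
--         parts = token.split('-')
--         if len(parts) == 1:
--             v = int(parts[0])
--             return (v, v)
--         return (int(parts[0]), int(parts[1]))
--     pairs = [bounds(t) for t in inputString.split(',')]
--     # Stage 2: expand all intervals uniformly.
--     numbers = []
--     for lo, hi in pairs:
--         numbers.extend(range(lo, hi + 1))
--     return numbers
-- ===== Notes on version B (the rewrite author's own statement) =====
-- stated objective: alternative
-- what changed: Replaces A's 2x2 whole-string branching with four separate construction paths (and a scalar-then-wrap case) by a two-stage pipeline with an explicit intermediate representation: first normalize every comma token into an interval pair (n,n)/(lo,hi), then expand all intervals in one uniform pass.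
import Mathlib
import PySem

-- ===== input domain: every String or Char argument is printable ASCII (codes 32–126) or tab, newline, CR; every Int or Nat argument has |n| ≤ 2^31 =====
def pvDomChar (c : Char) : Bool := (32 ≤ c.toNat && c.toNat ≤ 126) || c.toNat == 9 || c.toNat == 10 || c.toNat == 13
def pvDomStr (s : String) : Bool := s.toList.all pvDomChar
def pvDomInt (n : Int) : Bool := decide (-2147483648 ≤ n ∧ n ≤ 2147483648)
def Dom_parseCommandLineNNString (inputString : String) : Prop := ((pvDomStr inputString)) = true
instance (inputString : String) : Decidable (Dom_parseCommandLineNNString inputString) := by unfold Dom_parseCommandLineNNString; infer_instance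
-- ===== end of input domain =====

-- B replaces A's 2x2 whole-string branching (four construction paths plus a scalar-then-wrap case)
-- by a two-stage pipeline: normalize every comma token to an interval pair, then expand all intervals
-- in one uniform pass (objective: alternative decomposition, same cost).

-- int(p) with default 0; Pre_ guarantees every conversion actually succeeds
def pyIntOr0 (cs : List Char) : Int := (PySem.Int.ofChars? cs).getD 0

-- ===== PORT A =====
def parseCommandLineNNString (inputString : String) : List Int :=
  let s := inputString.toList
  if PySem.Chars.isIn [','] s then
    if PySem.Chars.isIn ['-'] s then
      -- '-' and ',' : loop over comma pieces, append range or single number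
      (PySem.Chars.splitOn s [',']).foldl (fun experimentNumbers t =>
        if PySem.Chars.isIn ['-'] t then
          let r := (PySem.Chars.splitOn t ['-']).map pyIntOr0
          experimentNumbers ++ PySem.List.pyRange (PySem.List.pyGetD r 0 0) (PySem.List.pyGetD r 1 0 + 1) 1
        else experimentNumbers ++ [pyIntOr0 t]) []
    else -- just ','
      (PySem.Chars.splitOn s [',']).map pyIntOr0
  else
    if PySem.Chars.isIn ['-'] s then -- just '-'
      let r := (PySem.Chars.splitOn s ['-']).map pyIntOr0
      PySem.List.pyRange (PySem.List.pyGetD r 0 0) (PySem.List.pyGetD r 1 0 + 1) 1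
    else -- single number; the isinstance check wraps it in a list
      [pyIntOr0 s]

-- ===== PORT B =====
-- stage 1: a comma token becomes an interval pair (n,n) / (lo,hi)
def pvBounds (t : List Char) : Int × Int :=
  let parts := PySem.Chars.splitOn t ['-']
  if parts.length = 1 then
    let v := pyIntOr0 (PySem.List.pyGetD parts 0 [])
    (v, v)
  else
    (pyIntOr0 (PySem.List.pyGetD parts 0 []), pyIntOr0 (PySem.List.pyGetD parts 1 []))

def parseCommandLineNNString_alt (inputString : String) : List Int :=
  let pairs := (PySem.Chars.splitOn inputString.toList [',']).map pvBounds
  -- stage 2: expand all intervals uniformly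
  pairs.foldl (fun numbers p => numbers ++ PySem.List.pyRange p.1 (p.2 + 1) 1) []

-- ===== PRECONDITION & SPEC =====
-- Pre_ excludes exactly the inputs where Python raises ValueError: some int() call fails,
-- i.e. some comma piece (or, for a piece containing '-', some of its '-' parts) is not an int literal.
def Pre_parseCommandLineNNString (inputString : String) : Prop :=
  ∀ t ∈ PySem.Chars.splitOn inputString.toList [','],
    if PySem.Chars.isIn ['-'] t then
      ∀ p ∈ PySem.Chars.splitOn t ['-'], (PySem.Int.ofChars? p).isSome = true
    else (PySem.Int.ofChars? t).isSome = true
instance (inputString : String) : Decidable (Pre_parseCommandLineNNString inputString) := by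
  unfold Pre_parseCommandLineNNString; infer_instance

def pvWitness_parseCommandLineNNString : String := "1-3,7,9-11"

def Spec_parseCommandLineNNString (inputString : String) (out : List Int) : Prop := out = parseCommandLineNNString_alt inputString
instance (inputString : String) (out : List Int) : Decidable (Spec_parseCommandLineNNString inputString out) := by unfold Spec_parseCommandLineNNString; infer_instance

-- ===== CLAIM (what is proved, stated in full; the proofs are below) =====
def Claim_equal_parseCommandLineNNString : Prop := ∀ (inputString : String), Dom_parseCommandLineNNString inputString → Pre_parseCommandLineNNString inputString → Spec_parseCommandLineNNString inputString (parseCommandLineNNString inputString)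

-- ===== LEMMAS AND PROOFS =====

-- simple recursive characterisation of single-character split
def mySplit (c : Char) : List Char → List (List Char)
  | [] => [[]]
  | a :: l => if a = c then [] :: mySplit c l else (mySplit c l).modifyHead (a :: ·)

theorem mySplit_ne_nil (c : Char) (l : List Char) : mySplit c l ≠ [] := by
  induction l with
  | nil => simp [mySplit]
  | cons a l ih =>
    simp only [mySplit]
    split
    · simp
    · rcases h : mySplit c l with _ | ⟨hd, tl⟩
      · exact absurd h ih
      · simp [List.modifyHead]

theorem go_spec (c : Char) (fuel : Nat) (l cur : List Char) (hacc : List (List Char))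
    (h : l.length < fuel) :
    PySem.Chars.splitOn.go [c] fuel l cur hacc =
      hacc.reverse ++ (mySplit c l).modifyHead (cur.reverse ++ ·) := by
  induction fuel generalizing l cur hacc with
  | zero => omega
  | succ f ih =>
    cases l with
    | nil => simp [PySem.Chars.splitOn.go, mySplit]
    | cons a rest =>
      have hpref : List.isPrefixOf [c] (a :: rest) = (c == a) := by
        simp [List.isPrefixOf]
      rw [PySem.Chars.splitOn.go, hpref]
      by_cases hac : c = a
      · subst hac
        rw [if_pos (by simp)]
        rw [ih _ _ _ (by simpa using Nat.lt_of_succ_lt_succ h)]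
        rcases hms : mySplit c rest with _ | ⟨hd, tl⟩
        · exact absurd hms (mySplit_ne_nil c rest)
        · simp [mySplit, hms]
      · rw [if_neg (by simp [hac])]
        rw [ih _ _ _ (by simpa using Nat.lt_of_succ_lt_succ h)]
        rcases hms : mySplit c rest with _ | ⟨hd, tl⟩
        · exact absurd hms (mySplit_ne_nil c rest)
        · simp [mySplit, hms, if_neg (Ne.symm hac)]

theorem splitOn_eq_mySplit (c : Char) (l : List Char) :
    PySem.Chars.splitOn l [c] = mySplit c l := by
  rw [PySem.Chars.splitOn, go_spec c (l.length + 1) l [] [] (Nat.lt_succ_self _)]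
  rcases hms : mySplit c l with _ | ⟨hd, tl⟩
  · exact absurd hms (mySplit_ne_nil c l)
  · simp

theorem mySplit_of_not_mem (c : Char) (l : List Char) (h : c ∉ l) : mySplit c l = [l] := by
  induction l with
  | nil => rfl
  | cons a l ih =>
    simp only [List.mem_cons, not_or] at h
    simp [mySplit, if_neg (Ne.symm h.1), ih h.2]

theorem mySplit_length_pos (c : Char) (l : List Char) : 0 < (mySplit c l).length :=
  List.length_pos_iff.mpr (mySplit_ne_nil c l)

theorem mySplit_length_ge_two (c : Char) (l : List Char) (h : c ∈ l) :
    2 ≤ (mySplit c l).length := by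
  induction l with
  | nil => simp at h
  | cons a l ih =>
    simp only [mySplit]
    by_cases hac : a = c
    · rw [if_pos hac]
      simpa using mySplit_length_pos c l
    · rw [if_neg hac]
      rw [List.length_modifyHead]
      have h' : c ∈ l := by
        rcases List.mem_cons.mp h with rfl | h'
        · exact absurd rfl hac
        · exact h'
      exact ih h'

theorem mySplit_subset (c : Char) (l : List Char) (t : List Char) (ht : t ∈ mySplit c l) :
    ∀ x ∈ t, x ∈ l := by
  induction l generalizing t with
  | nil => simp [mySplit] at ht; simp [ht]
  | cons a l ih =>
    simp only [mySplit] at ht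
    split at ht
    · rcases List.mem_cons.mp ht with rfl | ht
      · simp
      · exact fun x hx => List.mem_cons_of_mem a (ih t ht x hx)
    · rcases hms : mySplit c l with _ | ⟨hd, tl⟩
      · exact absurd hms (mySplit_ne_nil c l)
      · rw [hms] at ht
        simp only [List.modifyHead] at ht
        rcases List.mem_cons.mp ht with rfl | ht
        · intro x hx
          rcases List.mem_cons.mp hx with rfl | hx
          · simp
          · exact List.mem_cons_of_mem a (ih hd (hms ▸ List.mem_cons_self) x hx)
        · exact fun x hx => List.mem_cons_of_mem a (ih t (hms ▸ List.mem_cons_of_mem hd ht) x hx)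

theorem isIn_singleton_iff_mem (c : Char) (l : List Char) :
    PySem.Chars.isIn [c] l = true ↔ c ∈ l := by
  rw [PySem.Chars.isIn_iff_infix, List.singleton_infix_iff]

-- a token of the comma split of a dash-free string is dash-free
theorem token_no_dash (s t : List Char) (hd : PySem.Chars.isIn ['-'] s = false)
    (ht : t ∈ PySem.Chars.splitOn s [',']) : PySem.Chars.isIn ['-'] t = false := by
  rw [Bool.eq_false_iff, Ne, isIn_singleton_iff_mem] at hd ⊢
  rw [splitOn_eq_mySplit] at ht
  exact fun hm => hd (mySplit_subset ',' s t ht '-' hm)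

-- the per-token bridge: A's per-token expansion equals the expansion of B's interval pair
theorem token_eq (t : List Char) :
    (if PySem.Chars.isIn ['-'] t then
        PySem.List.pyRange (PySem.List.pyGetD ((PySem.Chars.splitOn t ['-']).map pyIntOr0) 0 0)
          (PySem.List.pyGetD ((PySem.Chars.splitOn t ['-']).map pyIntOr0) 1 0 + 1) 1
      else [pyIntOr0 t]) =
    PySem.List.pyRange (pvBounds t).1 ((pvBounds t).2 + 1) 1 := by
  by_cases hd : PySem.Chars.isIn ['-'] t = true
  · rw [if_pos hd]
    have hmem : '-' ∈ t := (isIn_singleton_iff_mem '-' t).mp hd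
    have h2 : 2 ≤ (PySem.Chars.splitOn t ['-']).length := by
      rw [splitOn_eq_mySplit]; exact mySplit_length_ge_two '-' t hmem
    rcases hps : PySem.Chars.splitOn t ['-'] with _ | ⟨p0, _ | ⟨p1, rest⟩⟩
    · rw [hps] at h2; simp at h2
    · rw [hps] at h2; simp at h2
    · simp only [pvBounds, hps]
      rw [if_neg (by simp)]
      simp [PySem.List.pyGetD, PySem.List.pyGet?, PySem.List.pyIdx?]
      rw [if_pos (by positivity)]
      simp
  · rw [if_neg hd]
    have hmem : '-' ∉ t := fun hm => hd ((isIn_singleton_iff_mem '-' t).mpr hm)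
    have hps : PySem.Chars.splitOn t ['-'] = [t] := by
      rw [splitOn_eq_mySplit]; exact mySplit_of_not_mem '-' t hmem
    simp only [pvBounds, hps]
    rw [if_pos (by simp)]
    simp [PySem.List.pyRange_one_singleton, PySem.List.pyGetD_zero_cons]

-- over a dash-free token list the interval expansion collapses to a plain map
theorem flatMap_expand_eq_map (l : List (List Char))
    (h : ∀ t ∈ l, PySem.Chars.isIn ['-'] t = false) :
    l.flatMap (fun t => PySem.List.pyRange (pvBounds t).1 ((pvBounds t).2 + 1) 1) =
      l.map pyIntOr0 := by
  induction l with
  | nil => rfl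
  | cons a l ih =>
    rw [List.flatMap_cons, List.map_cons, ih (fun t ht => h t (List.mem_cons_of_mem a ht))]
    have := token_eq a
    rw [if_neg (by simp [h a List.mem_cons_self])] at this
    rw [← this, List.singleton_append]

theorem alt_eq_foldl (inputString : String) :
    parseCommandLineNNString_alt inputString =
      (PySem.Chars.splitOn inputString.toList [',']).foldl
        (fun numbers t => numbers ++ PySem.List.pyRange (pvBounds t).1 ((pvBounds t).2 + 1) 1) [] := by
  unfold parseCommandLineNNString_alt
  rw [List.foldl_map]

theorem main_eq (inputString : String) :
    parseCommandLineNNString inputString = parseCommandLineNNString_alt inputString := by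
  rw [alt_eq_foldl]
  unfold parseCommandLineNNString
  by_cases hc : PySem.Chars.isIn [','] inputString.toList
  · rw [if_pos hc]
    by_cases hd : PySem.Chars.isIn ['-'] inputString.toList
    · rw [if_pos hd]
      congr 1
      funext acc t
      rw [← token_eq t]
      split <;> rfl
    · rw [if_neg hd, PySem.List.foldl_append_eq_flatMap, List.nil_append,
        flatMap_expand_eq_map _
          (fun t ht => token_no_dash _ t (Bool.eq_false_iff.mpr hd) ht)]
  · rw [if_neg hc]
    have hmem : ',' ∉ inputString.toList := fun hm => hc ((isIn_singleton_iff_mem ',' _).mpr hm)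
    have hts : PySem.Chars.splitOn inputString.toList [','] = [inputString.toList] := by
      rw [splitOn_eq_mySplit]; exact mySplit_of_not_mem ',' _ hmem
    rw [hts, List.foldl_cons, List.foldl_nil, List.nil_append, ← token_eq inputString.toList]

-- ===== VERDICT (by name: the statement is the Claim_ definition above) =====
theorem parseCommandLineNNString_spec : Claim_equal_parseCommandLineNNString := by
  intro s _ _
  exact main_eq s
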